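-- pv_equiv track=rewrite | github.com/amazingchawon/algorithm | PGM/LV2/42578/sol1.py | solution
-- ===== SOURCE A (Python) =====
-- def solution(clothes):
--     answer = 0
--     closet = {}
--
--     # STEP 1. 딕셔너리 만들기
--     for val, key in clothes:
--         if key in closet:
--             closet[key] += 1
--         else:
--             closet[key] = 1
--
--     items = list(closet.values())
--
--     cases = []
--
--     # STEP 2. 경우의 수 세기
--     for i in range(1 << len(closet)):
--         tmp = 1
--         check = 0
--         for idx in range(len(closet)):
--             if i & (1 << idx):
--                 check = 1
--                 tmp *= items[idx]
--         if check:
--             answer += tmp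
--
--     return answer
-- ===== SOURCE B (Python) =====
-- def solution(clothes):
--     counts = {}
--     for _, kind in clothes:
--         counts[kind] = counts.get(kind, 0) + 1
--     answer = 1
--     for n in counts.values():
--         answer *= n + 1
--     return answer - 1
-- ===== Notes on version B (the rewrite author's own statement) =====
-- stated objective: faster
-- what changed: Replaces A's enumeration of all 2^k subsets of categories (bitmask loop with an inner per-bit product) by the closed form: multiply (count_i + 1) over categories and subtract 1.
import Mathlib
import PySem

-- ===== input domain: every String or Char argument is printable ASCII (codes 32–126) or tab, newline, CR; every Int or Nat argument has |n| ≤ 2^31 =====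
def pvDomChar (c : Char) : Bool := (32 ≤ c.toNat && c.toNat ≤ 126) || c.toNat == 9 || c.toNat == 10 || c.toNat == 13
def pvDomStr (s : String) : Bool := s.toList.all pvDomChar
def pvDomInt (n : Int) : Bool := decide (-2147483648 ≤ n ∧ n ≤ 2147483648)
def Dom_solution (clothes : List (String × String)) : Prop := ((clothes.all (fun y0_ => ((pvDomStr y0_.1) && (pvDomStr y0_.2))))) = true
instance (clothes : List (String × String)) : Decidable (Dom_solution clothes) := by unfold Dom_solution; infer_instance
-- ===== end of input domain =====

-- B replaces A's enumeration of all 2^k category subsets by the closed form ∏(count_i+1) − 1 (objective: faster).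

-- ===== PORT A =====
-- Literal port of A: build the per-category counter dict, then for every bitmask
-- i in range(1 << k) take the product of the selected categories' counts,
-- adding it to the answer when the mask is non-empty (check flag).
def solution (clothes : List (String × String)) : Int :=
  let closet : PySem.Dict String Int :=
    clothes.foldl (fun closet vk =>
      if closet.contains vk.2 then closet.insert vk.2 (closet.getD vk.2 0 + 1)
      else closet.insert vk.2 1) PySem.Dict.empty
  let items : List Int := closet.values
  (PySem.List.pyRange 0 ((1 : Int) <<< (closet.size : Int)) 1).foldl (fun answer i =>
    let tc :=
      (PySem.List.pyRange 0 (closet.size : Int) 1).foldl (fun tc idx =>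
        if PySem.Int.band i ((1 : Int) <<< idx) ≠ 0 then
          (tc.1 * PySem.List.pyGetD items idx 0, (1 : Int))
        else tc) ((1 : Int), (0 : Int))
    if tc.2 ≠ 0 then answer + tc.1 else answer) 0

-- ===== PORT B =====
def solution_alt (clothes : List (String × String)) : Int :=
  let counts : PySem.Dict String Int :=
    clothes.foldl (fun counts vk => counts.insert vk.2 (counts.getD vk.2 0 + 1)) PySem.Dict.empty
  counts.values.foldl (fun answer n => answer * (n + 1)) 1 - 1

-- ===== PRECONDITION & SPEC =====
def Spec_solution (clothes : List (String × String)) (out : Int) : Prop := out = solution_alt clothes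
instance (clothes : List (String × String)) (out : Int) : Decidable (Spec_solution clothes out) := by unfold Spec_solution; infer_instance

-- ===== CLAIM (what is proved, stated in full; the proofs are below) =====
def Claim_equal_solution : Prop := ∀ (clothes : List (String × String)), Dom_solution clothes → Spec_solution clothes (solution clothes)

-- ===== LEMMAS AND PROOFS =====

-- Product of items[idx] over the low bits of j that are set.
def pvProdBits : Nat → List Int → Int
  | _, [] => 1
  | j, x :: r => (if j % 2 = 1 then x else 1) * pvProdBits (j / 2) r

-- Whether any of the low (items.length) bits of j is set.
def pvAnyBits : Nat → List Int → Bool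
  | _, [] => false
  | j, _ :: r => decide (j % 2 = 1) || pvAnyBits (j / 2) r

lemma pvInnerNat (items : List Int) : ∀ (j : Nat) (t c : Int),
    (List.range items.length).foldl
      (fun tc k => if j.testBit k then (tc.1 * items.getD k 0, (1 : Int)) else tc) (t, c)
    = (t * pvProdBits j items, if pvAnyBits j items then 1 else c) := by
  induction items with
  | nil => intro j t c; simp [pvProdBits, pvAnyBits]
  | cons x r ih =>
    intro j t c
    rw [List.length_cons, List.range_succ_eq_map, List.foldl_cons, List.foldl_map]
    simp only [Nat.testBit_add_one, List.getD_cons_succ, Nat.testBit_zero, List.getD_cons_zero]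
    rw [ih]
    by_cases h : j % 2 = 1
    · by_cases h2 : pvAnyBits (j / 2) r <;> simp [pvProdBits, pvAnyBits, h, h2] <;> ring
    · by_cases h2 : pvAnyBits (j / 2) r <;> simp [pvProdBits, pvAnyBits, h, h2]

lemma pvInnerInt (items : List Int) (j : Nat) :
    (PySem.List.pyRange 0 (items.length : Int) 1).foldl
      (fun tc idx =>
        if PySem.Int.band (j : Int) ((1 : Int) <<< idx) ≠ 0 then
          (tc.1 * PySem.List.pyGetD items idx 0, (1 : Int))
        else tc) ((1 : Int), (0 : Int))
    = (pvProdBits j items, if pvAnyBits j items then 1 else 0) := by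
  rw [PySem.List.pyRange_one, List.foldl_map]
  have hstep : ∀ (tc : Int × Int), ∀ k ∈ List.range (((items.length : Int) - 0).toNat),
      (if PySem.Int.band (j : Int) ((1 : Int) <<< ((0 : Int) + (k : Int))) ≠ 0 then
          (tc.1 * PySem.List.pyGetD items ((0 : Int) + (k : Int)) 0, (1 : Int))
        else tc)
      = (if j.testBit k then (tc.1 * items.getD k 0, (1 : Int)) else tc) := by
    intro tc k _
    have h0 : (0 : Int) + (k : Int) = (k : Int) := by simp
    rw [h0, Int.one_shiftLeft, PySem.Int.band_natCast]
    have h4 : ((j &&& 2 ^ k : Nat) : Int) ≠ 0 ↔ j.testBit k := by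
      rw [Nat.and_two_pow, Nat.cast_ne_zero]
      cases hb : j.testBit k <;> simp
    by_cases hb : j.testBit k <;> simp [h4, hb]
  rw [PySem.List.foldl_congr_mem _ _ _ _ hstep]
  have h5 : ((items.length : Int) - 0).toNat = items.length := by omega
  rw [h5, pvInnerNat]
  simp

-- Sum over range(2m) regrouped into consecutive (even, odd) pairs.
lemma pvPairSum (m : Nat) (f : Nat → Int) :
    ((List.range (2 * m)).map f).sum
    = ((List.range m).map (fun j => f (2 * j) + f (2 * j + 1))).sum := by
  induction m with
  | zero => simp
  | succ m ih =>
    have h : 2 * (m + 1) = (2 * m + 1) + 1 := by ring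
    rw [h, List.range_succ, List.range_succ, List.range_succ (n := m)]
    simp only [List.map_append, List.sum_append, ih]
    simp
    ring

lemma pvSumProdBits (items : List Int) :
    ((List.range (2 ^ items.length)).map (fun j => pvProdBits j items)).sum
    = (items.map (fun n => n + 1)).prod := by
  induction items with
  | nil => simp [pvProdBits]
  | cons x r ih =>
    have hp : 2 ^ (x :: r).length = 2 * 2 ^ r.length := by
      rw [List.length_cons, pow_succ]; ring
    rw [hp, pvPairSum]
    have heq : ∀ j : Nat, pvProdBits (2 * j) (x :: r) + pvProdBits (2 * j + 1) (x :: r)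
        = pvProdBits j r + x * pvProdBits j r := by
      intro j
      have e1 : (2 * j) % 2 = 0 := by omega
      have e2 : (2 * j) / 2 = j := by omega
      have e3 : (2 * j + 1) % 2 = 1 := by omega
      have e4 : (2 * j + 1) / 2 = j := by omega
      simp [pvProdBits, e1, e2, e3, e4]
    simp only [heq]
    rw [PySem.List.sum_map_add_int (List.range (2 ^ r.length))
      (fun j => pvProdBits j r) (fun j => x * pvProdBits j r),
      PySem.List.sum_map_const_mul_int (List.range (2 ^ r.length)) x (fun j => pvProdBits j r),
      ih]
    simp
    ring

lemma pvSumMasked (items : List Int) :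
    ((List.range (2 ^ items.length)).map
      (fun j => if pvAnyBits j items then pvProdBits j items else 0)).sum
    = (items.map (fun n => n + 1)).prod - 1 := by
  induction items with
  | nil => simp [pvAnyBits]
  | cons x r ih =>
    have hp : 2 ^ (x :: r).length = 2 * 2 ^ r.length := by
      rw [List.length_cons, pow_succ]; ring
    rw [hp, pvPairSum]
    have heq : ∀ j : Nat,
        ((if pvAnyBits (2 * j) (x :: r) then pvProdBits (2 * j) (x :: r) else 0)
          + (if pvAnyBits (2 * j + 1) (x :: r) then pvProdBits (2 * j + 1) (x :: r) else 0))
        = (if pvAnyBits j r then pvProdBits j r else 0) + x * pvProdBits j r := by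
      intro j
      have e1 : (2 * j) % 2 = 0 := by omega
      have e2 : (2 * j) / 2 = j := by omega
      have e3 : (2 * j + 1) % 2 = 1 := by omega
      have e4 : (2 * j + 1) / 2 = j := by omega
      simp [pvProdBits, pvAnyBits, e1, e2, e3, e4]
    simp only [heq]
    rw [PySem.List.sum_map_add_int (List.range (2 ^ r.length))
      (fun j => if pvAnyBits j r then pvProdBits j r else 0) (fun j => x * pvProdBits j r),
      PySem.List.sum_map_const_mul_int (List.range (2 ^ r.length)) x (fun j => pvProdBits j r),
      ih, pvSumProdBits]
    simp
    ring

lemma pvFoldlProd (items : List Int) : ∀ (a : Int),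
    items.foldl (fun a n => a * (n + 1)) a = a * (items.map (fun n => n + 1)).prod := by
  induction items with
  | nil => intro a; simp
  | cons x r ih => intro a; simp [ih]; ring

-- A's whole mask loop computes ∏(items_i + 1) − 1.
lemma pvMain (items : List Int) :
    (PySem.List.pyRange 0 ((1 : Int) <<< ((items.length : Nat) : Int)) 1).foldl (fun answer i =>
      let tc :=
        (PySem.List.pyRange 0 (items.length : Int) 1).foldl (fun tc idx =>
          if PySem.Int.band i ((1 : Int) <<< idx) ≠ 0 then
            (tc.1 * PySem.List.pyGetD items idx 0, (1 : Int))
          else tc) ((1 : Int), (0 : Int))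
      if tc.2 ≠ 0 then answer + tc.1 else answer) 0
    = items.foldl (fun answer n => answer * (n + 1)) 1 - 1 := by
  rw [Int.one_shiftLeft, PySem.List.pyRange_one 0 (((2 ^ items.length : Nat)) : Int),
    List.foldl_map]
  have hbody : ∀ (answer : Int), ∀ k ∈ List.range ((((2 ^ items.length : Nat) : Int) - 0).toNat),
      (let tc :=
        (PySem.List.pyRange 0 (items.length : Int) 1).foldl (fun tc idx =>
          if PySem.Int.band ((0 : Int) + (k : Int)) ((1 : Int) <<< idx) ≠ 0 then
            (tc.1 * PySem.List.pyGetD items idx 0, (1 : Int))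
          else tc) ((1 : Int), (0 : Int))
       if tc.2 ≠ 0 then answer + tc.1 else answer)
      = answer + (if pvAnyBits k items then pvProdBits k items else 0) := by
    intro answer k _
    have h0 : (0 : Int) + (k : Int) = (k : Int) := by simp
    simp only [h0, pvInnerInt items k]
    by_cases h : pvAnyBits k items <;> simp [h]
  rw [PySem.List.foldl_congr_mem _ _ _ _ hbody, PySem.List.foldl_add]
  have h5 : (((2 ^ items.length : Nat) : Int) - 0).toNat = 2 ^ items.length := by
    rw [Int.sub_zero]; exact Int.toNat_natCast _
  rw [h5, pvSumMasked, pvFoldlProd]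
  ring

-- A's dict-building loop equals B's (when the key is absent, getD gives 0).
lemma pvClosetEq (clothes : List (String × String)) :
    clothes.foldl (fun (d : PySem.Dict String Int) vk =>
      if d.contains vk.2 then d.insert vk.2 (d.getD vk.2 0 + 1)
      else d.insert vk.2 1) PySem.Dict.empty
    = clothes.foldl (fun (d : PySem.Dict String Int) vk => d.insert vk.2 (d.getD vk.2 0 + 1))
        PySem.Dict.empty := by
  apply PySem.List.foldl_congr_mem
  intro d vk _
  by_cases h : d.contains vk.2
  · simp [h]
  · have hz : d.getD vk.2 0 = 0 :=
      PySem.Dict.getD_of_not_contains d (0 : Int) (by simpa using h)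
    simp [h, hz]

-- ===== VERDICT (by name: the statement is the Claim_ definition above) =====
theorem solution_spec : Claim_equal_solution := by
  intro clothes _
  simp only [Spec_solution, solution, solution_alt]
  rw [pvClosetEq]
  have hsize : ∀ (d : PySem.Dict String Int), PySem.Dict.size d = d.values.length := by
    intro d; simp [PySem.Dict.size, PySem.Dict.values]
  rw [hsize]
  exact pvMain _
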